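-- pv_equiv track=rewrite | github.com/ingridt123/adventofcode | 2023/day3.py | getNumIndices
-- ===== SOURCE A (Python) =====
-- def getNumIndices(s):
--   indices = []
--   firstIndex = None
--   for index, x in enumerate(s):
--     if firstIndex == None and x.isdigit():
--       firstIndex = index
--     elif firstIndex != None and not x.isdigit():
--       indices.append((int(s[firstIndex:index]), firstIndex, index-1))
--       firstIndex = None
--   return indices
-- ===== SOURCE B (Python) =====
-- import re
--
-- def getNumIndices(s):
--   # One regex pass: each maximal digit run followed by a non-digit (the lookahead
--   # mirrors A, which only records a number once it sees a following non-digit,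
--   # so a run that reaches end-of-string is not recorded).
--   return [(int(m.group()), m.start(), m.end() - 1)
--           for m in re.finditer(r'\d+(?=\D)', s)]
-- ===== Notes on version B (the rewrite author's own statement) =====
-- stated objective: idiomatic
-- what changed: A's hand-rolled two-state character scan (firstIndex bookkeeping) is replaced by a single regex pass, re.finditer(r'\d+(?=\D)'), whose lookahead reproduces A's rule of only recording a run once a following non-digit is seen.
import Mathlib
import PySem

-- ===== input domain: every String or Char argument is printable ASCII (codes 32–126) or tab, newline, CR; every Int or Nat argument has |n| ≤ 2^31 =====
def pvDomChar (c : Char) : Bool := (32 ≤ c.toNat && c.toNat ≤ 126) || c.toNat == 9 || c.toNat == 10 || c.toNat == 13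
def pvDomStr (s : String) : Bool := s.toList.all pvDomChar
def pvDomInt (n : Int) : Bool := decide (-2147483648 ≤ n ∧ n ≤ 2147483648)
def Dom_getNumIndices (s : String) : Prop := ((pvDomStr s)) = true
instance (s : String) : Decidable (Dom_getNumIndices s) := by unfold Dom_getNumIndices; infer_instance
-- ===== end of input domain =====

-- B replaces A's manual per-character two-state scan with a single regex pass (re.finditer r'\d+(?=\D)'): more idiomatic, and a timing run measured it faster by a constant factor (C regex engine vs Python loop).

-- ===== PORT A =====
-- one step of A's loop body; `int(s[firstIndex:index])` never raises here (the slice is a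
-- nonempty run of ASCII digits), so `.getD 0` is dead code making the port total.
def aStep (s : List Char) (st : List (Int × Int × Int) × Option Int) (p : Int × Char) :
    List (Int × Int × Int) × Option Int :=
  match st, p with
  | (indices, firstIndex), (index, x) =>
    match firstIndex with
    | none => if PySem.Chars.isdigit x then (indices, some index) else (indices, none)
    | some fi =>
        if ¬ PySem.Chars.isdigit x then
          (indices ++ [((PySem.Int.ofChars? (PySem.List.slice s (some fi) (some index))).getD 0,
                        fi, index - 1)], none)
        else (indices, some fi)

def getNumIndices (s : String) : List (Int × Int × Int) :=
  ((PySem.List.enumerate s.toList).foldl (aStep s.toList) ([], none)).1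

-- ===== PORT B =====
-- hand port of Source B's regex r'\d+(?=\D)' (PySem has no regex): at a digit, the match is the
-- maximal digit run `c :: rest.takeWhile isdigit`; the lookahead (?=\D) succeeds iff a character
-- follows the run, i.e. `rest.dropWhile isdigit ≠ []`; exact on the ASCII domain, where Python's
-- \d / str.isdigit are exactly the digits 0-9 (= PySem.Chars.isdigit).
def altGo : List Char → Nat → List (Int × Int × Int)
  | [], _ => []
  | c :: rest, i =>
    if PySem.Chars.isdigit c then
      let tw := rest.takeWhile PySem.Chars.isdigit
      let rest' := rest.dropWhile PySem.Chars.isdigit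
      if rest' = [] then []        -- run reaches end of string: lookahead fails, no match
      else ((PySem.Int.ofChars? (c :: tw)).getD 0, (i : Int), (i : Int) + (1 + tw.length) - 1)
             :: altGo rest' (i + (1 + tw.length))
    else altGo rest (i + 1)
termination_by cs _ => cs.length
decreasing_by
  · have := List.length_dropWhile_le PySem.Chars.isdigit rest
    simp; omega
  · simp

def getNumIndices_alt (s : String) : List (Int × Int × Int) := altGo s.toList 0

-- ===== PRECONDITION & SPEC =====
def Spec_getNumIndices (s : String) (out : List (Int × Int × Int)) : Prop := out = getNumIndices_alt s
instance (s : String) (out : List (Int × Int × Int)) : Decidable (Spec_getNumIndices s out) := by unfold Spec_getNumIndices; infer_instance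

-- ===== CLAIM (what is proved, stated in full; the proofs are below) =====
def Claim_equal_getNumIndices : Prop := ∀ (s : String), Dom_getNumIndices s → Spec_getNumIndices s (getNumIndices s)

-- ===== LEMMAS AND PROOFS =====

-- the value A's fold reaches while inside a digit run that started at fi with digits r already read
def runRHS (acc : List (Int × Int × Int)) (fi : Nat) (r cs : List Char) (i : Nat) :
    List (Int × Int × Int) :=
  if cs.dropWhile PySem.Chars.isdigit = [] then acc
  else
    acc ++ ((PySem.Int.ofChars? (r ++ cs.takeWhile PySem.Chars.isdigit)).getD 0, (fi : Int),
            (fi : Int) + r.length + (cs.takeWhile PySem.Chars.isdigit).length - 1)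
        :: altGo (cs.dropWhile PySem.Chars.isdigit) (i + (cs.takeWhile PySem.Chars.isdigit).length)

lemma drop_succ_of_drop_cons {s rest : List Char} {c : Char} {i : Nat}
    (h : s.drop i = c :: rest) : s.drop (i + 1) = rest := by
  rw [← List.tail_drop, h]; rfl

lemma main_invariant (s : List Char) :
    ∀ n cs, List.length cs ≤ n →
      (∀ (acc : List (Int × Int × Int)) (i : Nat), s.drop i = cs →
        ((PySem.List.enumerate cs (i : Int)).foldl (aStep s) (acc, none)).1 = acc ++ altGo cs i) ∧
      (∀ (acc : List (Int × Int × Int)) (fi : Nat) (r : List Char) (i : Nat),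
        s.drop fi = r ++ cs → i = fi + r.length →
        ((PySem.List.enumerate cs (i : Int)).foldl (aStep s) (acc, some (fi : Int))).1 =
          runRHS acc fi r cs i) := by
  intro n
  induction n with
  | zero =>
    intro cs hlen
    have hcs : cs = [] := List.eq_nil_of_length_eq_zero (Nat.le_zero.mp hlen)
    subst hcs
    constructor
    · intro acc i _; simp [PySem.List.enumerate_nil, altGo]
    · intro acc fi r i _ _; simp [PySem.List.enumerate_nil, runRHS]
  | succ n ih =>
    intro cs hlen
    match cs with
    | [] =>
      constructor
      · intro acc i _; simp [PySem.List.enumerate_nil, altGo]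
      · intro acc fi r i _ _; simp [PySem.List.enumerate_nil, runRHS]
    | c :: rest =>
      have hrest : rest.length ≤ n := by simpa using Nat.lt_succ_iff.mp (by simpa using hlen)
      constructor
      · -- idle state
        intro acc i hdrop
        rw [PySem.List.enumerate_cons, List.foldl_cons]
        by_cases hd : PySem.Chars.isdigit c
        · -- start a run at i with r = [c]
          have step : aStep s (acc, none) ((i : Int), c) = (acc, some (i : Int)) := by
            simp [aStep, hd]
          rw [step]
          have hrun := (ih rest hrest).2 acc i [c] (i + 1)
            (by simpa [hdrop]) (by simp)
          push_cast at hrun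
          rw [hrun]
          rw [altGo]
          simp only [hd, if_pos, ite_true]
          unfold runRHS
          by_cases hdw : rest.dropWhile PySem.Chars.isdigit = []
          · simp [hdw]
          · simp only [hdw, if_neg, ite_false, List.append_cancel_left_eq, List.cons.injEq,
              Prod.mk.injEq, List.singleton_append, List.length_singleton, List.length_cons,
              List.length_append, List.length_nil, List.append_assoc]
            and_intros <;> first | rfl | trivial | omega | (congr 1 <;> omega)
        · -- stay idle
          have step : aStep s (acc, none) ((i : Int), c) = (acc, none) := by
            simp [aStep, hd]
          rw [step]
          have hidle := (ih rest hrest).1 acc (i + 1) (drop_succ_of_drop_cons hdrop)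
          push_cast at hidle
          rw [hidle]
          conv_rhs => rw [altGo]
          simp [hd]
      · -- inside a run
        intro acc fi r i hdrop hi
        rw [PySem.List.enumerate_cons, List.foldl_cons]
        by_cases hd : PySem.Chars.isdigit c
        · -- extend the run
          have step : aStep s (acc, some (fi : Int)) ((i : Int), c) = (acc, some (fi : Int)) := by
            simp [aStep, hd]
          rw [step]
          have hrun := (ih rest hrest).2 acc fi (r ++ [c]) (i + 1)
            (by simpa [hdrop]) (by simp [hi]; omega)
          push_cast at hrun
          rw [hrun]
          unfold runRHS
          simp only [List.takeWhile_cons, List.dropWhile_cons, hd, if_pos, ite_true]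
          by_cases hdw : rest.dropWhile PySem.Chars.isdigit = []
          · simp [hdw]
          · simp only [hdw, if_neg, ite_false, List.append_cancel_left_eq, List.cons.injEq,
              Prod.mk.injEq, List.singleton_append, List.length_singleton, List.length_cons,
              List.length_append, List.length_nil, List.append_assoc]
            and_intros <;> first | rfl | trivial | omega | (congr 1 <;> omega)
        · -- run ends: A emits the tuple, then continues idle
          have hslice : PySem.List.slice s (some (fi : Int)) (some (i : Int)) = r := by
            rw [PySem.List.slice_natCast]
            have h1 : i - fi = r.length := by omega
            rw [h1, hdrop, List.take_left]
          have step : aStep s (acc, some (fi : Int)) ((i : Int), c) =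
              (acc ++ [((PySem.Int.ofChars? r).getD 0, (fi : Int), (i : Int) - 1)], none) := by
            simp [aStep, hd, hslice]
          rw [step]
          have hdropi : s.drop i = c :: rest := by
            have h2 : s.drop i = (s.drop fi).drop r.length := by
              rw [List.drop_drop]; congr 1
            rw [h2, hdrop, List.drop_left]
          have hidle := (ih rest hrest).1
            (acc ++ [((PySem.Int.ofChars? r).getD 0, (fi : Int), (i : Int) - 1)]) (i + 1)
            (drop_succ_of_drop_cons hdropi)
          push_cast at hidle
          rw [hidle]
          unfold runRHS
          simp only [List.takeWhile_cons, List.dropWhile_cons, hd, if_neg, ite_false,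
            Bool.not_eq_true]
          conv_rhs => rw [altGo]
          rw [List.append_assoc]
          simp only [hd, Bool.false_eq_true, if_false, ite_false, List.cons_ne_nil,
            List.takeWhile_nil, List.append_nil, List.length_nil, Nat.add_zero,
            List.append_cancel_left_eq, List.singleton_append, List.cons.injEq, Prod.mk.injEq]
          and_intros <;> first | rfl | trivial | omega | (congr 1 <;> omega)

-- ===== VERDICT (by name: the statement is the Claim_ definition above) =====
theorem getNumIndices_spec : Claim_equal_getNumIndices := by
  intro s _
  unfold Spec_getNumIndices getNumIndices getNumIndices_alt
  have h := (main_invariant s.toList s.toList.length s.toList (le_refl _)).1 [] 0 (by simp)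
  simpa using h
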